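-- pv_equiv track=rewrite | github.com/gyeong707/SynSym-KDD-2026 | symptom-identification/data_loader/data_loaders.py | make_mlc_instance
-- ===== SOURCE A (Python) =====
-- def make_mlc_instance(premises, symptom_list, desc_list):
--     X_premise = []
--     X_hypothesis = []
--
--     for premise in premises:
--         for _, desc in zip(symptom_list, desc_list):
--             X_premise.append(premise)
--             X_hypothesis.append(desc)
--
--     return X_premise, X_hypothesis
-- ===== SOURCE B (Python) =====
-- def make_mlc_instance(premises, symptom_list, desc_list):
--     k = min(len(symptom_list), len(desc_list))
--     total = len(premises) * k
--     X_premise = [premises[i // k] for i in range(total)]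
--     X_hypothesis = [desc_list[i % k] for i in range(total)]
--     return X_premise, X_hypothesis
-- ===== Notes on version B (the rewrite author's own statement) =====
-- stated objective: alternative
-- what changed: Replaces A's nested iteration over the two lists by closed-form index arithmetic: the output length total = len(premises)*min(len(symptom_list),len(desc_list)) is computed first, then each output position i is filled directly as premises[i // k] and desc_list[i % k] over a single flat range.
import Mathlib
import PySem

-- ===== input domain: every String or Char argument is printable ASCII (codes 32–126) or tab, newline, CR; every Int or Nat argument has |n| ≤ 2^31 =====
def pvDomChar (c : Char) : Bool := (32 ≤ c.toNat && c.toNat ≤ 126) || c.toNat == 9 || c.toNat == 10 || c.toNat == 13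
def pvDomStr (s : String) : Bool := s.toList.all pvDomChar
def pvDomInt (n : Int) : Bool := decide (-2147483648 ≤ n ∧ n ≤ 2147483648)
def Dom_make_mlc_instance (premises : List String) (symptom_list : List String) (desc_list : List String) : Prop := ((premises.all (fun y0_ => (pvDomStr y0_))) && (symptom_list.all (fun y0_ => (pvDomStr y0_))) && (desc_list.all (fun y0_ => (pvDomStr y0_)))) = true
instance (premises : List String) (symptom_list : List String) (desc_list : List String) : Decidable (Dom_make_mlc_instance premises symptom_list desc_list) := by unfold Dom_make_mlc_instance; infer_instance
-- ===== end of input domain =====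

-- B fills the two output lists by closed-form index arithmetic (premises[i // k], desc_list[i % k] over one flat range) instead of A's interleaved nested append loop; objective: alternative, same cost.


-- ===== PORT A =====
-- Literal port of A: fold over premises; inner fold over zip(symptom_list, desc_list),
-- appending premise and desc to the two accumulators in lockstep.
def make_mlc_instance (premises : List String) (symptom_list : List String) (desc_list : List String) : List String × List String :=
  premises.foldl
    (fun st premise =>
      (symptom_list.zip desc_list).foldl
        (fun st2 pair => (st2.1 ++ [premise], st2.2 ++ [pair.2])) st)
    ([], [])

-- ===== PORT B =====
-- Port of B: k = min of the lengths, total = len(premises)*k; each output position i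
-- is filled directly as premises[i // k] and desc_list[i % k] over range(total).
-- All indices produced are in range, so getD's default is never returned.
def make_mlc_instance_alt (premises : List String) (symptom_list : List String) (desc_list : List String) : List String × List String :=
  let k := min symptom_list.length desc_list.length
  let total := premises.length * k
  ((List.range total).map (fun i => premises.getD (i / k) ""),
   (List.range total).map (fun i => desc_list.getD (i % k) ""))

-- ===== PRECONDITION & SPEC =====
def Spec_make_mlc_instance (premises : List String) (symptom_list : List String) (desc_list : List String) (out : List String × List String) : Prop := out = make_mlc_instance_alt premises symptom_list desc_list
instance (premises : List String) (symptom_list : List String) (desc_list : List String) (out : List String × List String) : Decidable (Spec_make_mlc_instance premises symptom_list desc_list out) := by unfold Spec_make_mlc_instance; infer_instance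

-- ===== CLAIM (what is proved, stated in full; the proofs are below) =====
def Claim_equal_make_mlc_instance : Prop := ∀ (premises : List String) (symptom_list : List String) (desc_list : List String), Dom_make_mlc_instance premises symptom_list desc_list → Spec_make_mlc_instance premises symptom_list desc_list (make_mlc_instance premises symptom_list desc_list)

-- ===== LEMMAS AND PROOFS =====

-- A's inner loop appends the premise and the second components of zs.
lemma mlc_inner (zs : List (String × String)) (st : List String × List String)
    (premise : String) :
    zs.foldl (fun st2 pair => (st2.1 ++ [premise], st2.2 ++ [pair.2])) st
      = (st.1 ++ zs.map (fun _ => premise), st.2 ++ zs.map Prod.snd) := by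
  induction zs generalizing st with
  | nil => simp
  | cons z zs ih => simp [List.foldl_cons, ih]

-- A's outer loop in closed form.
lemma mlc_outer (premises s d : List String) (st : List String × List String) :
    premises.foldl
      (fun st premise =>
        (s.zip d).foldl (fun st2 pair => (st2.1 ++ [premise], st2.2 ++ [pair.2])) st) st
      = (st.1 ++ premises.flatMap (fun p => (s.zip d).map (fun _ => p)),
         st.2 ++ (List.replicate premises.length ((s.zip d).map Prod.snd)).flatten) := by
  induction premises generalizing st with
  | nil => simp
  | cons p ps ih =>
    rw [List.foldl_cons, mlc_inner, ih]
    simp [List.replicate_succ, List.flatten_cons]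

lemma mlc_zip_snd (s d : List String) :
    (s.zip d).map Prod.snd = d.take (min s.length d.length) := by
  induction s generalizing d with
  | nil => simp
  | cons a s ih =>
    cases d with
    | nil => simp
    | cons b d =>
      simp [List.zip_cons_cons, ih, Nat.succ_min_succ]

-- B's first component equals A's flatMap of constant blocks.
lemma mlc_div (ps : List String) (k : ℕ) :
    (List.range (ps.length * k)).map (fun i => ps.getD (i / k) "")
      = ps.flatMap (fun p => List.replicate k p) := by
  rcases Nat.eq_zero_or_pos k with hk | hk
  · simp [hk]
  induction ps with
  | nil => simp
  | cons p ps ih =>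
    have h1 : (p :: ps).length * k = k + ps.length * k := by
      simp [List.length_cons, Nat.succ_mul, Nat.add_comm]
    rw [h1, List.range_add, List.map_append, List.map_map, List.flatMap_cons]
    congr 1
    · have : ∀ i ∈ List.range k, (p :: ps).getD (i / k) "" = p := by
        intro i hi
        rw [Nat.div_eq_of_lt (List.mem_range.mp hi)]
        rfl
      rw [List.map_congr_left this, List.map_const', List.length_range]
    · rw [← ih]
      apply List.map_congr_left
      intro i _
      have : (k + i) / k = i / k + 1 := by
        rw [Nat.add_comm, Nat.add_div_right _ hk]
      simp [this]

-- B's second component equals A's flattened replicate of the truncated descriptions.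
lemma mlc_mod (d : List String) (n k : ℕ) (hkd : k ≤ d.length) :
    (List.range (n * k)).map (fun i => d.getD (i % k) "")
      = (List.replicate n (d.take k)).flatten := by
  induction n with
  | zero => simp
  | succ n ih =>
    have h1 : (n + 1) * k = k + n * k := by
      rw [Nat.succ_mul, Nat.add_comm]
    rw [h1, List.range_add, List.map_append, List.map_map,
        List.replicate_succ, List.flatten_cons]
    congr 1
    · apply List.ext_getElem
      · simp [Nat.min_eq_left hkd]
      · intro i h1 h2
        simp only [List.getElem_map, List.getElem_range, List.getElem_take]
        simp only [List.length_map, List.length_range] at h1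
        rw [Nat.mod_eq_of_lt h1, List.getD_eq_getElem]
    · rw [← ih]
      apply List.map_congr_left
      intro i _
      simp [Nat.add_mod_left]

-- ===== VERDICT (by name: the statement is the Claim_ definition above) =====
theorem make_mlc_instance_spec : Claim_equal_make_mlc_instance := by
  intro premises s d _
  unfold Spec_make_mlc_instance make_mlc_instance make_mlc_instance_alt
  rw [mlc_outer]
  simp only [List.nil_append, Prod.mk.injEq]
  constructor
  · rw [mlc_div]
    apply List.flatMap_congr
    intro p _
    simp [List.map_const', List.length_zip]
  · rw [mlc_mod d premises.length _ (Nat.min_le_right _ _)]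
    rw [mlc_zip_snd]
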